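-- pv_equiv track=rewrite | github.com/katzenpost/worldmap | worldmap/world_map.py | get_address_urls
-- ===== SOURCE A (Python) =====
-- def get_address_urls(nodes):
--     urls = []
--     for i, node in enumerate(nodes):
--         addrs = node["Addresses"]
--         if "tcp" in addrs:
--             urls.append(addrs["tcp"])
--         elif "tcp4" in addrs:
--             urls.append(addrs["tcp4"])
--         elif "quic" in addrs:
--             urls.append(addrs["quic"])
--         else:
--             continue
--     return urls
-- ===== SOURCE B (Python) =====
-- _RANK = {"tcp": 0, "tcp4": 1, "quic": 2}
--
-- def get_address_urls(nodes):
--     urls = []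
--     for node in nodes:
--         best = None  # (rank, url) with the smallest rank seen so far
--         for key, url in node["Addresses"].items():
--             r = _RANK.get(key)
--             if r is not None and (best is None or r < best[0]):
--                 best = (r, url)
--         if best is not None:
--             urls.append(best[1])
--     return urls
-- ===== Notes on version B (the rewrite author's own statement) =====
-- stated objective: alternative
-- what changed: Instead of probing the three protocol keys with an if/elif membership chain, B scans each node's address items once, reducing them with an accumulator to the entry of minimal priority rank ('tcp'<'tcp4'<'quic') and appending its URL.
import Mathlib
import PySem

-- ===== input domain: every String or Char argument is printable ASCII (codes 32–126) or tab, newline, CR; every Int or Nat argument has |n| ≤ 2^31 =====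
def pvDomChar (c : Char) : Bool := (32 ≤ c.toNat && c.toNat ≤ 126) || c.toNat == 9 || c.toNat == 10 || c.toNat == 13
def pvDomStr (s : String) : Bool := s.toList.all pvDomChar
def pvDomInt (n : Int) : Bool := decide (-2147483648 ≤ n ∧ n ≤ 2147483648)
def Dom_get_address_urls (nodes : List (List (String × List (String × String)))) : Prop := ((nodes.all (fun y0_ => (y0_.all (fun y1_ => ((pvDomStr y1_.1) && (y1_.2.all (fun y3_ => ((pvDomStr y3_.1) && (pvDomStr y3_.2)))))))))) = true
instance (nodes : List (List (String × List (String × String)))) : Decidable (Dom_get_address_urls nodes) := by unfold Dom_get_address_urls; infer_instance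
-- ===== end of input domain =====

-- B replaces A's if/elif key-probing chain by a single scan of each node's address items
-- that keeps the entry of minimal priority rank (alternative); return value only.

-- ===== PORT A =====
-- A's for-loop with an if/elif chain of membership tests; node["Addresses"] raising
-- KeyError is excluded by Pre_ (the port falls back to skipping such a node there).
def get_address_urls (nodes : List (List (String × List (String × String)))) : List String :=
  nodes.foldl (fun urls node =>
    match (PySem.Dict.mk node).get? "Addresses" with
    | none => urls   -- unreachable under Pre_get_address_urls (Python raises KeyError)
    | some addrs =>
      let d := PySem.Dict.mk addrs
      if h1 : (d.get? "tcp").isSome then urls ++ [(d.get? "tcp").get h1]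
      else if h2 : (d.get? "tcp4").isSome then urls ++ [(d.get? "tcp4").get h2]
      else if h3 : (d.get? "quic").isSome then urls ++ [(d.get? "quic").get h3]
      else urls) []

-- ===== PORT B =====
-- _RANK = {"tcp": 0, "tcp4": 1, "quic": 2}
def pvRankDict : PySem.Dict String Nat := PySem.Dict.mk [("tcp", 0), ("tcp4", 1), ("quic", 2)]

-- the body of B's inner loop: keep the (rank, url) pair of smallest rank seen so far
def pvBestStep (best : Option (Nat × String)) (kv : String × String) : Option (Nat × String) :=
  match pvRankDict.get? kv.1 with
  | none => best
  | some r =>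
    match best with
    | none => some (r, kv.2)
    | some b => if r < b.1 then some (r, kv.2) else best

def get_address_urls_alt (nodes : List (List (String × List (String × String)))) : List String :=
  nodes.foldl (fun urls node =>
    match (PySem.Dict.mk node).get? "Addresses" with
    | none => urls   -- unreachable under Pre_get_address_urls (Python raises KeyError)
    | some addrs =>
      match (PySem.Dict.mk addrs).items.foldl pvBestStep none with
      | some b => urls ++ [b.2]
      | none => urls) []

-- ===== PRECONDITION & SPEC =====
-- Pre_ excludes exactly the inputs where Python A raises KeyError: a node without an
-- "Addresses" key (B raises there too).
def Pre_get_address_urls (nodes : List (List (String × List (String × String)))) : Prop :=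
  ∀ node ∈ nodes, ((PySem.Dict.mk node).get? "Addresses").isSome = true
instance (nodes : List (List (String × List (String × String)))) : Decidable (Pre_get_address_urls nodes) := by unfold Pre_get_address_urls; infer_instance
def pvWitness_get_address_urls : (List (List (String × List (String × String)))) :=
  [[("Addresses", [("tcp", "tcp://1.2.3.4:80"), ("quic", "quic://1.2.3.4:81")])],
   [("Addresses", [("onion", "x")])]]
def Spec_get_address_urls (nodes : List (List (String × List (String × String)))) (out : List String) : Prop := out = get_address_urls_alt nodes
instance (nodes : List (List (String × List (String × String)))) (out : List String) : Decidable (Spec_get_address_urls nodes out) := by unfold Spec_get_address_urls; infer_instance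

-- ===== CLAIM (what is proved, stated in full; the proofs are below) =====
def Claim_equal_get_address_urls : Prop := ∀ (nodes : List (List (String × List (String × String)))), Dom_get_address_urls nodes → Pre_get_address_urls nodes → Spec_get_address_urls nodes (get_address_urls nodes)

-- ===== LEMMAS AND PROOFS =====

def pvCombine (b c : Option (Nat × String)) : Option (Nat × String) :=
  match b, c with
  | none, c => c
  | some b, none => some b
  | some b, some c => if c.1 < b.1 then some c else some b
lemma rank_spec (k : String) : pvRankDict.get? k =
    if k = "tcp" then some 0 else if k = "tcp4" then some 1 else
    if k = "quic" then some 2 else none := by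
  by_cases h1 : k = "tcp" <;> by_cases h2 : k = "tcp4" <;> by_cases h3 : k = "quic" <;>
    simp_all [pvRankDict, PySem.Dict.get?]
  all_goals simp [Ne.symm h1, Ne.symm h2, Ne.symm h3]
lemma foldl_bestStep_combine (L : List (String × String)) :
    ∀ b, L.foldl pvBestStep b = pvCombine b (L.foldl pvBestStep none) := by
  induction L with
  | nil => intro b; cases b <;> rfl
  | cons x L ih =>
    intro b
    show (L.foldl pvBestStep (pvBestStep b x)) = pvCombine b (L.foldl pvBestStep (pvBestStep none x))
    rw [ih (pvBestStep b x), ih (pvBestStep none x)]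
    rcases hS : L.foldl pvBestStep none with _ | s <;>
      rcases hr : pvRankDict.get? x.1 with _ | r <;>
      rcases b with _ | bb <;>
      simp [pvBestStep, pvCombine, hr] <;> (try split_ifs) <;>
      (try simp) <;> (try split_ifs) <;> first | rfl | omega

def pvChain (L : List (String × String)) : Option (Nat × String) :=
  match (PySem.Dict.mk L).get? "tcp" with
  | some v => some (0, v)
  | none =>
    match (PySem.Dict.mk L).get? "tcp4" with
    | some v => some (1, v)
    | none =>
      match (PySem.Dict.mk L).get? "quic" with
      | some v => some (2, v)
      | none => none

lemma scan_eq_chain (L : List (String × String)) :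
    L.foldl pvBestStep none = pvChain L := by
  induction L with
  | nil => rfl
  | cons x L ih =>
    obtain ⟨k, v⟩ := x
    rw [List.foldl_cons, foldl_bestStep_combine, ih]
    by_cases h1 : k = "tcp"
    · subst h1
      rcases hc : pvChain L with _ | s <;>
        simp [pvBestStep, rank_spec, pvChain, PySem.Dict.get?_mk_cons, pvCombine]
    · by_cases h2 : k = "tcp4"
      · subst h2
        rcases ha : (PySem.Dict.mk L).get? "tcp" with _ | w <;>
          rcases hb : (PySem.Dict.mk L).get? "tcp4" with _ | w' <;>
          rcases hq : (PySem.Dict.mk L).get? "quic" with _ | w'' <;>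
          simp [pvBestStep, rank_spec, pvChain, PySem.Dict.get?_mk_cons, pvCombine, ha, hb, hq, h1]
      · by_cases h3 : k = "quic"
        · subst h3
          rcases ha : (PySem.Dict.mk L).get? "tcp" with _ | w <;>
            rcases hb : (PySem.Dict.mk L).get? "tcp4" with _ | w' <;>
            rcases hq : (PySem.Dict.mk L).get? "quic" with _ | w'' <;>
            simp [pvBestStep, rank_spec, pvChain, PySem.Dict.get?_mk_cons, pvCombine, ha, hb, hq, h1, h2]
        · simp [pvBestStep, rank_spec, pvChain, PySem.Dict.get?_mk_cons, pvCombine, h1, h2, h3]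

lemma step_eq (urls : List String) (node : List (String × List (String × String))) :
    (match (PySem.Dict.mk node).get? "Addresses" with
     | none => urls
     | some addrs =>
       let d := PySem.Dict.mk addrs
       if h1 : (d.get? "tcp").isSome then urls ++ [(d.get? "tcp").get h1]
       else if h2 : (d.get? "tcp4").isSome then urls ++ [(d.get? "tcp4").get h2]
       else if h3 : (d.get? "quic").isSome then urls ++ [(d.get? "quic").get h3]
       else urls)
    = (match (PySem.Dict.mk node).get? "Addresses" with
       | none => urls
       | some addrs =>
         match (PySem.Dict.mk addrs).items.foldl pvBestStep none with
         | some b => urls ++ [b.2]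
         | none => urls) := by
  cases hA : (PySem.Dict.mk node).get? "Addresses" with
  | none => rfl
  | some addrs =>
    dsimp only
    rw [scan_eq_chain]
    rcases ha : (PySem.Dict.mk addrs).get? "tcp" with _ | w <;>
      rcases hb : (PySem.Dict.mk addrs).get? "tcp4" with _ | w' <;>
      rcases hq : (PySem.Dict.mk addrs).get? "quic" with _ | w'' <;>
      simp [pvChain, ha, hb, hq]

-- ===== VERDICT (by name: the statement is the Claim_ definition above) =====
theorem get_address_urls_spec : Claim_equal_get_address_urls := by
  intro nodes _ _
  unfold Spec_get_address_urls get_address_urls get_address_urls_alt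
  have h : ∀ (f g : List String → List (String × List (String × String)) → List String),
      f = g → nodes.foldl f [] = nodes.foldl g [] := by intro f g hfg; rw [hfg]
  exact h _ _ (funext fun urls => funext fun node => step_eq urls node)
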